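-- pv_equiv track=rewrite | github.com/0Lunar/Challenges | Olicyber/crypto/CrazyXor/solve.py | crazy_xor
-- ===== SOURCE A (Python) =====
-- import math
--
-- def prime_factors(n):
-- 	# Returns a list that includes prime factors with their repetitions
--
-- 	p = 2
-- 	primes = []
-- 	while p * p <= n:
-- 		while n % p == 0:
-- 			primes.append(p)
-- 			n //= p
-- 		p += 1
--
-- 	if(n > 1):
-- 		primes.append(n)
--
-- 	return primes
--
-- def crazy_xor(x):
-- 	primes = prime_factors(x)
-- 	res = 0
--
-- 	for p1 in primes:
-- 		for p2 in primes:
-- 			if p1 <= p2: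
-- 				res = res ^ math.lcm(p1, p2) # Least common multiple
--
-- 	return res
-- ===== SOURCE B (Python) =====
-- import math
--
-- def _tri_xor(odds):
--     # XOR of the head, of its lcm with each later prime, and recursively the tail's triangle.
--     if not odds:
--         return 0
--     a, rest = odds[0], odds[1:]
--     r = a
--     for b in rest:
--         r ^= math.lcm(a, b)
--     return r ^ _tri_xor(rest)
--
-- def crazy_xor(x):
--     # One trial-division pass collecting, in increasing order, the distinct primes of odd
--     # multiplicity (even multiplicities cancel under XOR), then an upper-triangle XOR pass.
--     odds = []
--     n = x
--     d = 2
--     while d * d <= n: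
--         e = 0
--         while n % d == 0:
--             n //= d
--             e += 1
--         if e % 2 == 1:
--             odds.append(d)
--         d += 1
--     if n > 1:
--         odds.append(n)
--     return _tri_xor(odds)
-- ===== Notes on version B (the rewrite author's own statement) =====
-- stated objective: alternative
-- what changed: A builds the full repeated prime-factor list and XORs lcm(p1,p2) over every ordered pair with p1<=p2; B never builds that list: one trial-division pass directly collects the distinct primes of odd multiplicity (even multiplicities cancel under XOR) and a recursive upper-triangle pass XORs each such prime and the lcm of each unordered pair once.
import Mathlib
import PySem

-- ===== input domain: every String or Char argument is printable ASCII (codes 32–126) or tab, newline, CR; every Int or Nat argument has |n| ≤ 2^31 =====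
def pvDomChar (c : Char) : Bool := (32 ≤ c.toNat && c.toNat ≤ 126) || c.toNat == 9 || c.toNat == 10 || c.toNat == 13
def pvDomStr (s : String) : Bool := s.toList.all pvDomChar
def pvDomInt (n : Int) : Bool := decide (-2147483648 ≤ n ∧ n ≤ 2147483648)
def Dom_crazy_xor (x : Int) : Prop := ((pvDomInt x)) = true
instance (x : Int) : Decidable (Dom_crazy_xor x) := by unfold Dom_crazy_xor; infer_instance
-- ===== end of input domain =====

-- B replaces A's repeated-factor list and full p1<=p2 double loop by one trial-division
-- pass that directly collects the distinct odd-multiplicity primes, then a recursive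
-- upper-triangle XOR pass (alternative decomposition; same asymptotic cost).

-- ===== PORT A =====

-- math.lcm(a, b) (Python lcm is the nonnegative lcm of |a|, |b|)
def pvLcm (a b : Int) : Int := (Int.lcm a b : Int)

-- inner `while n % p == 0` loop of prime_factors; the fuel (|n|+1 at the call site) only
-- makes the recursion structural, it is never exhausted
def pfDiv : Nat → Int → Int → List Int → (List Int × Int)
  | 0, _, n, acc => (acc, n)
  | f + 1, p, n, acc =>
    if PySem.Int.mod n p = 0 then pfDiv f p (PySem.Int.floordiv n p) (acc ++ [p])
    else (acc, n)

-- outer `while p * p <= n` loop of prime_factors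
def pfGo : Nat → Int → Int → List Int → (List Int × Int)
  | 0, _, n, acc => (acc, n)
  | f + 1, p, n, acc =>
    if p * p ≤ n then
      let r := pfDiv (n.natAbs + 1) p n acc
      pfGo f (p + 1) r.2 r.1
    else (acc, n)

def prime_factors (n : Int) : List Int :=
  let r := pfGo (n.natAbs + 2) 2 n []
  if r.2 > 1 then r.1 ++ [r.2] else r.1

def crazy_xor (x : Int) : Int :=
  let primes := prime_factors x
  primes.foldl
    (fun res p1 =>
      primes.foldl
        (fun res p2 => if p1 ≤ p2 then PySem.Int.bxor res (pvLcm p1 p2) else res) res)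
    0

-- ===== PORT B =====

-- Source B's inner `while n % d == 0` loop: counts the exponent e while dividing
def bDiv : Nat → Int → Int → Nat → (Nat × Int)
  | 0, _, n, e => (e, n)
  | f + 1, d, n, e =>
    if PySem.Int.mod n d = 0 then bDiv f d (PySem.Int.floordiv n d) (e + 1)
    else (e, n)

-- Source B's outer loop: appends d to odds exactly when its multiplicity is odd
def bGo : Nat → Int → Int → List Int → (List Int × Int)
  | 0, _, n, odds => (odds, n)
  | f + 1, d, n, odds =>
    if d * d ≤ n then
      let r := bDiv (n.natAbs + 1) d n 0
      bGo f (d + 1) r.2 (if r.1 % 2 = 1 then odds ++ [d] else odds)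
    else (odds, n)

-- Source B's recursive _tri_xor
def triXor : List Int → Int
  | [] => 0
  | a :: rest =>
    PySem.Int.bxor (rest.foldl (fun r b => PySem.Int.bxor r ((Int.lcm a b : Nat) : Int)) a)
      (triXor rest)

def crazy_xor_alt (x : Int) : Int :=
  let r := bGo (x.natAbs + 2) 2 x []
  let odds := if r.2 > 1 then r.1 ++ [r.2] else r.1
  triXor odds

-- ===== PRECONDITION & SPEC =====
def Spec_crazy_xor (x : Int) (out : Int) : Prop := out = crazy_xor_alt x
instance (x : Int) (out : Int) : Decidable (Spec_crazy_xor x out) := by unfold Spec_crazy_xor; infer_instance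

-- ===== CLAIM (what is proved, stated in full; the proofs are below) =====
def Claim_equal_crazy_xor : Prop := ∀ (x : Int), Dom_crazy_xor x → Spec_crazy_xor x (crazy_xor x)

-- ===== LEMMAS AND PROOFS =====

-- XOR algebra for PySem.Int.bxor
theorem pv_negneg (n : Nat) : (-(-(n:Int) - 1) - 1) = (n:Int) := by ring

theorem pvBxor_assoc (a b c : Int) :
    PySem.Int.bxor (PySem.Int.bxor a b) c = PySem.Int.bxor a (PySem.Int.bxor b c) := by
  unfold PySem.Int.bxor
  split_ifs <;> first
    | omega
    | simp only [pv_negneg, Int.toNat_natCast, Nat.xor_assoc]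

theorem pvBxor_zero_left (a : Int) : PySem.Int.bxor 0 a = a := by
  rw [PySem.Int.bxor_comm]; exact PySem.Int.bxor_zero a

-- fold of all bxors of a list
def lx (l : List Int) : Int := l.foldr PySem.Int.bxor 0

theorem lx_cons (a : Int) (l : List Int) : lx (a :: l) = PySem.Int.bxor a (lx l) := rfl

theorem lx_append (l m : List Int) : lx (l ++ m) = PySem.Int.bxor (lx l) (lx m) := by
  induction l with
  | nil => simp [lx, pvBxor_zero_left]
  | cons a l ih => rw [List.cons_append, lx_cons, lx_cons, ih, pvBxor_assoc]

theorem lx_replicate (n : Nat) (a : Int) :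
    lx (List.replicate n a) = if n % 2 = 1 then a else 0 := by
  induction n with
  | zero => rfl
  | succ n ih =>
      rw [List.replicate_succ, lx_cons, ih]
      rcases Nat.even_or_odd n with h | h
      · have h1 : n % 2 = 0 := Nat.even_iff.mp h
        have h2 : (n + 1) % 2 = 1 := by omega
        simp [h1, h2, PySem.Int.bxor_zero]
      · have h1 : n % 2 = 1 := Nat.odd_iff.mp h
        have h2 : (n + 1) % 2 = 0 := by omega
        simp [h1, h2, PySem.Int.bxor_self]

-- fold of bxors = bxor of the fold list
theorem foldl_bxor_map (l : List Int) (f : Int → Int) (init : Int) :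
    l.foldl (fun r b => PySem.Int.bxor r (f b)) init = PySem.Int.bxor init (lx (l.map f)) := by
  induction l generalizing init with
  | nil => simp [lx, PySem.Int.bxor_zero]
  | cons a l ih => simp [ih, lx_cons, pvBxor_assoc]

-- A's guarded inner loop as an lx over the filtered list
theorem foldl_bxor_if (l : List Int) (a init : Int) :
    l.foldl (fun res p2 => if a ≤ p2 then PySem.Int.bxor res (pvLcm a p2) else res) init
      = PySem.Int.bxor init (lx ((l.filter (fun b => a ≤ b)).map (pvLcm a))) := by
  induction l generalizing init with
  | nil => simp [lx, PySem.Int.bxor_zero]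
  | cons b l ih =>
      by_cases h : a ≤ b
      · simp [h, ih, lx_cons, pvBxor_assoc]
      · simp [h, ih]

-- the XOR each left factor contributes in A's double loop over list L
def hA (L : List Int) (a : Int) : Int := lx ((L.filter (fun b => a ≤ b)).map (pvLcm a))

theorem foldl_outer (M L : List Int) (init : Int) :
    M.foldl
      (fun res p1 =>
        L.foldl (fun res p2 => if p1 ≤ p2 then PySem.Int.bxor res (pvLcm p1 p2) else res) res)
      init
      = PySem.Int.bxor init (lx (M.map (hA L))) := by
  induction M generalizing init with
  | nil => simp [lx, PySem.Int.bxor_zero]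
  | cons a M ih =>
      rw [List.foldl_cons, foldl_bxor_if, ih, List.map_cons, lx_cons, pvBxor_assoc, hA]

-- the triangle list of Source B's recursion, and triXor as its XOR
def tri : List Int → List Int
  | [] => []
  | a :: rest => a :: (rest.map (pvLcm a) ++ tri rest)

theorem triXor_lx (O : List Int) : triXor O = lx (tri O) := by
  induction O with
  | nil => rfl
  | cons a rest ih =>
      show PySem.Int.bxor (rest.foldl (fun r b => PySem.Int.bxor r (pvLcm a b)) a) (triXor rest)
        = lx (tri (a :: rest))
      rw [foldl_bxor_map, ih, tri, lx_cons, lx_append, pvBxor_assoc]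

theorem pvLcm_self {a : Int} (ha : 0 ≤ a) : pvLcm a a = a := by
  simp [pvLcm, Int.lcm_self]
  omega

-- over a strictly increasing nonnegative list, A's per-element contributions are exactly
-- Source B's head-plus-upper-triangle recursion
theorem lx_tri (O : List Int) (hs : O.Pairwise (· < ·)) (h0 : ∀ a ∈ O, 0 ≤ a) :
    lx (O.map (hA O)) = lx (tri O) := by
  induction O with
  | nil => rfl
  | cons a rest ih =>
      have hlt : ∀ b ∈ rest, a < b := fun b hb => (List.pairwise_cons.mp hs).1 b hb
      have hfa : (a :: rest).filter (fun b => a ≤ b) = a :: rest := by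
        rw [List.filter_cons]
        simp only [le_refl, decide_true, if_true]
        rw [List.filter_eq_self.mpr (fun b hb => by simp [le_of_lt (hlt b hb)])]
      have hrow : hA (a :: rest) a = PySem.Int.bxor a (lx (rest.map (pvLcm a))) := by
        unfold hA
        rw [hfa, List.map_cons, lx_cons, pvLcm_self (h0 a List.mem_cons_self)]
      have hrest : ∀ x ∈ rest, hA (a :: rest) x = hA rest x := by
        intro x hx
        unfold hA
        rw [List.filter_cons]
        simp [not_le.mpr (hlt x hx)]
      rw [List.map_cons, List.map_congr_left hrest, lx_cons, hrow,
        ih (List.pairwise_cons.mp hs).2 (fun b hb => h0 b (List.mem_cons_of_mem a hb))]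
      show _ = lx (tri (a :: rest))
      rw [tri, lx_cons, lx_append, pvBxor_assoc]

-- ===== the block decomposition linking the two factorisation loops =====

-- blocks (q, e): prime q with multiplicity e
def flatB (QE : List (Int × Nat)) : List Int := QE.flatMap (fun qe => List.replicate qe.2 qe.1)

def oddHeads (QE : List (Int × Nat)) : List Int :=
  (QE.filter (fun qe => qe.2 % 2 = 1)).map Prod.fst

-- joint characterisation of the two inner division loops
theorem divLoop (f : Nat) : ∀ (n p : Int) (acc : List Int) (e0 : Nat), 2 ≤ p → 0 < n →
    n.natAbs < f →
    ∃ (e : Nat) (n1 : Int), pfDiv f p n acc = (acc ++ List.replicate e p, n1) ∧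
      bDiv f p n e0 = (e0 + e, n1) ∧ ¬ (p ∣ n1) ∧ n1 ∣ n ∧ 0 < n1 := by
  induction f with
  | zero => intro n p acc e0 hp hn hf; omega
  | succ f ih =>
      intro n p acc e0 hp hn hf
      by_cases hdvd : p ∣ n
      · have hmod : PySem.Int.mod n p = 0 := (PySem.Int.mod_eq_zero_iff_dvd n p).mpr hdvd
        have hfd : PySem.Int.floordiv n p = n / p :=
          PySem.Int.floordiv_eq_ediv_of_pos (by omega)
        have hmul : p * (n / p) = n := Int.mul_ediv_cancel' hdvd
        have hn1 : 0 < n / p := by nlinarith [hmul]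
        have hlt : n / p < n := by
          by_contra hge
          rw [not_lt] at hge
          nlinarith
        have hfs : (n / p).natAbs < f := by omega
        obtain ⟨e, n1, hA1, hB1, hnd, hd, hpos⟩ := ih (n / p) p (acc ++ [p]) (e0 + 1) hp hn1 hfs
        have hstepA : pfDiv (f + 1) p n acc = pfDiv f p (n / p) (acc ++ [p]) := by
          simp [pfDiv, hmod, hfd]
        have hstepB : bDiv (f + 1) p n e0 = bDiv f p (n / p) (e0 + 1) := by
          simp [bDiv, hmod, hfd]
        refine ⟨e + 1, n1, ?_, ?_, hnd, hd.trans ⟨p, by linarith [hmul]⟩, hpos⟩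
        · rw [hstepA, hA1]
          simp [List.replicate_succ]
        · rw [hstepB, hB1, show e0 + (e + 1) = e0 + 1 + e from by omega]
      · have hmod : ¬ PySem.Int.mod n p = 0 := fun h =>
          hdvd ((PySem.Int.mod_eq_zero_iff_dvd n p).mp h)
        refine ⟨0, n, ?_, ?_, hdvd, dvd_refl n, hn⟩
        · simp [pfDiv, hmod]
        · simp [bDiv, hmod]

-- joint characterisation of the two outer trial-division loops
theorem goLoop (f : Nat) : ∀ (p n : Int) (acc odds : List Int), 2 ≤ p → 0 < n →
    (∀ d : Int, 2 ≤ d → d < p → ¬ d ∣ n) →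
    ∃ (QE : List (Int × Nat)) (n1 : Int),
      pfGo f p n acc = (acc ++ flatB QE, n1) ∧ bGo f p n odds = (odds ++ oddHeads QE, n1) ∧
      0 < n1 ∧ n1 ∣ n ∧ QE.Pairwise (fun a b => a.1 < b.1) ∧ (∀ qe ∈ QE, p ≤ qe.1) ∧
      (∀ d : Int, 2 ≤ d → d ∣ n1 → ∀ qe ∈ QE, qe.1 < d) := by
  induction f with
  | zero =>
      intro p n acc odds hp hn hsmall
      exact ⟨[], n, by simp [pfGo, flatB], by simp [bGo, oddHeads], hn, dvd_refl n,
        List.Pairwise.nil, by simp, by simp⟩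
  | succ f ih =>
      intro p n acc odds hp hn hsmall
      by_cases hc : p * p ≤ n
      · obtain ⟨e, n1, hDA, hDB, hnd, hd1, hpos1⟩ :=
          divLoop (n.natAbs + 1) n p acc 0 hp hn (by omega)
        have hsmall1 : ∀ d : Int, 2 ≤ d → d < p + 1 → ¬ d ∣ n1 := by
          intro d h2 hdp hddvd
          rcases lt_or_eq_of_le (by omega : d ≤ p) with h | h
          · exact hsmall d h2 h (hddvd.trans hd1)
          · exact hnd (h ▸ hddvd)
        obtain ⟨QE', n2, hGA, hGB, hpos2, hd2, hpw, hge, hdivb⟩ :=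
          ih (p + 1) n1 (acc ++ List.replicate e p)
            (if e % 2 = 1 then odds ++ [p] else odds) (by omega) hpos1 hsmall1
        refine ⟨(p, e) :: QE', n2, ?_, ?_, hpos2, hd2.trans hd1, ?_, ?_, ?_⟩
        · simp only [pfGo, if_pos hc, hDA, hGA, flatB, List.flatMap_cons, List.append_assoc]
        · simp only [bGo, if_pos hc, hDB, Nat.zero_add, hGB, oddHeads, List.filter_cons]
          by_cases hpar : e % 2 = 1
          · simp [hpar, List.append_assoc]
          · simp [hpar]
        · exact List.pairwise_cons.mpr ⟨fun qe hqe => by have := hge qe hqe; omega, hpw⟩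
        · intro qe hqe
          rcases List.mem_cons.mp hqe with h | h
          · simp [h]
          · have := hge qe h; omega
        · intro d h2 hddvd qe hqe
          rcases List.mem_cons.mp hqe with h | h
          · subst h
            show p < d
            rcases lt_trichotomy d p with hlt | heq | hgt
            · exact absurd (hddvd.trans (hd2.trans hd1)) (hsmall d h2 hlt)
            · exact absurd (heq ▸ (hddvd.trans hd2)) hnd
            · exact hgt
          · exact hdivb d h2 hddvd qe h
      · exact ⟨[], n, by simp [pfGo, hc, flatB], by simp [bGo, hc, oddHeads], hn, dvd_refl n,
          List.Pairwise.nil, by simp, by simp⟩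

-- XOR over the flattened blocks collapses to XOR over the odd-multiplicity heads
theorem lx_flat (QE : List (Int × Nat)) (f : Int → Int) :
    lx ((flatB QE).map f) = lx ((oddHeads QE).map f) := by
  induction QE with
  | nil => rfl
  | cons qe rest ih =>
      obtain ⟨q, e⟩ := qe
      rw [show flatB ((q, e) :: rest) = List.replicate e q ++ flatB rest from rfl,
        List.map_append, lx_append, List.map_replicate, lx_replicate]
      rw [show oddHeads ((q, e) :: rest)
          = (if e % 2 = 1 then [q] else []) ++ oddHeads rest from by
        rw [oddHeads, List.filter_cons]
        by_cases hpar : e % 2 = 1 <;> simp [hpar, oddHeads]]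
      by_cases hpar : e % 2 = 1
      · rw [if_pos hpar, if_pos hpar, List.singleton_append, List.map_cons, lx_cons, ih]
      · rw [if_neg hpar, if_neg hpar, pvBxor_zero_left, List.nil_append, ih]

-- A's per-element contribution over the flattened blocks equals it over the odd heads
theorem hA_flat (QE : List (Int × Nat)) (a : Int) :
    hA (flatB QE) a = hA (oddHeads QE) a := by
  induction QE with
  | nil => rfl
  | cons qe rest ih =>
      obtain ⟨q, e⟩ := qe
      have hfr : (List.replicate e q).filter (fun b => a ≤ b)
          = if a ≤ q then List.replicate e q else [] := by
        by_cases h : a ≤ q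
        · simp [h]
        · simp [h]
      unfold hA
      rw [show flatB ((q, e) :: rest) = List.replicate e q ++ flatB rest from rfl,
        List.filter_append, hfr]
      rw [show oddHeads ((q, e) :: rest)
          = (if e % 2 = 1 then [q] else []) ++ oddHeads rest from by
        rw [oddHeads, List.filter_cons]
        by_cases hpar : e % 2 = 1 <;> simp [hpar, oddHeads]]
      rw [List.filter_append,
        show ((if e % 2 = 1 then [q] else []).filter (fun b => a ≤ b))
          = if a ≤ q ∧ e % 2 = 1 then [q] else [] from by
        by_cases hq : a ≤ q <;> by_cases hpar : e % 2 = 1 <;> simp [hq, hpar]]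
      unfold hA at ih
      by_cases hq : a ≤ q <;> by_cases hpar : e % 2 = 1
      · rw [if_pos hq, if_pos ⟨hq, hpar⟩, List.map_append, lx_append, List.map_replicate,
          lx_replicate, if_pos hpar, List.singleton_append, List.map_cons, lx_cons, ih]
      · rw [if_pos hq, if_neg (by tauto), List.map_append, lx_append, List.map_replicate,
          lx_replicate, if_neg hpar, pvBxor_zero_left, List.nil_append, ih]
      · rw [if_neg hq, if_neg (by tauto), List.nil_append, List.nil_append, ih]
      · rw [if_neg hq, if_neg (by tauto), List.nil_append, List.nil_append, ih]

theorem pfGo_stop (f : Nat) (p n : Int) (acc : List Int) (h : ¬ p * p ≤ n) :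
    pfGo (f + 1) p n acc = (acc, n) := by
  simp only [pfGo]
  rw [if_neg h]

theorem bGo_stop (f : Nat) (p n : Int) (odds : List Int) (h : ¬ p * p ≤ n) :
    bGo (f + 1) p n odds = (odds, n) := by
  simp only [bGo]
  rw [if_neg h]

-- the core equality for positive x
theorem main_eq (x : Int) : crazy_xor x = crazy_xor_alt x := by
  by_cases hx : 0 < x
  · obtain ⟨QE, n1, hGA, hGB, hpos, _, hpw, hge, hdivb⟩ :=
      goLoop (x.natAbs + 2) 2 x [] [] (by omega) hx (by intro d h1 h2; omega)
    -- the final block list: the residual (if > 1) joins as a block of multiplicity 1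
    set QEf := if n1 > 1 then QE ++ [(n1, 1)] else QE with hQEf
    have hL : prime_factors x = flatB QEf := by
      rw [prime_factors, hGA, hQEf]
      by_cases hres : n1 > 1
      · simp [hres, flatB]
      · simp [hres, flatB]
    have hO : (if (bGo (x.natAbs + 2) 2 x []).2 > 1
          then (bGo (x.natAbs + 2) 2 x []).1 ++ [(bGo (x.natAbs + 2) 2 x []).2]
          else (bGo (x.natAbs + 2) 2 x []).1) = oddHeads QEf := by
      rw [hGB, hQEf]
      by_cases hres : n1 > 1
      · simp [hres, oddHeads, List.filter_append]
      · simp [hres]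
    have hpwf : QEf.Pairwise (fun a b => a.1 < b.1) := by
      rw [hQEf]
      by_cases hres : n1 > 1
      · rw [if_pos hres, List.pairwise_append]
        refine ⟨hpw, List.pairwise_singleton _ _, fun a ha b hb => ?_⟩
        simp at hb
        rw [hb]
        exact hdivb n1 (by omega) (dvd_refl n1) a ha
      · rw [if_neg hres]; exact hpw
    have hgef : ∀ qe ∈ QEf, 2 ≤ qe.1 := by
      intro qe hqe
      rw [hQEf] at hqe
      by_cases hres : n1 > 1
      · rw [if_pos hres] at hqe
        rcases List.mem_append.mp hqe with h | h
        · exact hge qe h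
        · simp at h; rw [h]; omega
      · rw [if_neg hres] at hqe; exact hge qe hqe
    have hpwO : (oddHeads QEf).Pairwise (· < ·) := by
      rw [oddHeads, List.pairwise_map]
      exact hpwf.filter _
    have h0O : ∀ a ∈ oddHeads QEf, 0 ≤ a := by
      intro a ha
      rw [oddHeads, List.mem_map] at ha
      obtain ⟨qe, hqe, rfl⟩ := ha
      have := hgef qe (List.mem_filter.mp hqe).1
      omega
    rw [crazy_xor, crazy_xor_alt]
    simp only [hL, hO]
    rw [foldl_outer, pvBxor_zero_left, triXor_lx, lx_flat]
    rw [List.map_congr_left (fun a _ => hA_flat QEf a)]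
    exact lx_tri _ hpwO h0O
  · -- x ≤ 0: both loops exit immediately and both results are 0
    have hA0 : pfGo (x.natAbs + 2) 2 x [] = ([], x) :=
      pfGo_stop (x.natAbs + 1) 2 x [] (by omega)
    have hB0 : bGo (x.natAbs + 2) 2 x [] = ([], x) :=
      bGo_stop (x.natAbs + 1) 2 x [] (by omega)
    rw [crazy_xor, crazy_xor_alt, prime_factors]
    simp [hA0, hB0, if_neg (by omega : ¬ x > 1), triXor]

-- ===== VERDICT (by name: the statement is the Claim_ definition above) =====
theorem crazy_xor_spec : Claim_equal_crazy_xor := by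
  intro x _
  unfold Spec_crazy_xor
  exact main_eq x
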